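-- pv_equiv track=rewrite | github.com/ShahbazVK/Operating-System-Algorithms | Q3_Anagram.py | stringCheckAnagram
-- ===== SOURCE A (Python) =====
-- def stringCheckAnagram(s1,s2):
--     alist = list(s2)
--
--     pos1 = 0
--     stillOk = True
--
--     while pos1 < len(s1) and stillOk:
--         pos2 = 0
--         found = False
--         while pos2 < len(alist) and not found:
--             if s1[pos1] == alist[pos2]:
--                 found = True
--             else:
--                 pos2 = pos2 + 1
--
--         if found:
--             alist[pos2] = None
--         else:
--             stillOk = False
--
--         pos1 = pos1 + 1
--     return stillOk
--
-- s1 = "earth"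
--
-- s2 = "heart"
-- ===== SOURCE B (Python) =====
-- def stringCheckAnagram(s1, s2):
--     # True iff every character of s1 occurs in s2 at least as often as in s1
--     # (s1 is a sub-multiset of s2).
--     return all(s1.count(c) <= s2.count(c) for c in s1)
-- ===== Notes on version B (the rewrite author's own statement) =====
-- stated objective: simpler
-- what changed: Replaces the scan-and-mark loop (copy s2 to a list, linear-search and None-out one cell per character of s1) with a one-line multiset-count comparison: all(s1.count(c) <= s2.count(c) for c in s1).
import Mathlib
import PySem

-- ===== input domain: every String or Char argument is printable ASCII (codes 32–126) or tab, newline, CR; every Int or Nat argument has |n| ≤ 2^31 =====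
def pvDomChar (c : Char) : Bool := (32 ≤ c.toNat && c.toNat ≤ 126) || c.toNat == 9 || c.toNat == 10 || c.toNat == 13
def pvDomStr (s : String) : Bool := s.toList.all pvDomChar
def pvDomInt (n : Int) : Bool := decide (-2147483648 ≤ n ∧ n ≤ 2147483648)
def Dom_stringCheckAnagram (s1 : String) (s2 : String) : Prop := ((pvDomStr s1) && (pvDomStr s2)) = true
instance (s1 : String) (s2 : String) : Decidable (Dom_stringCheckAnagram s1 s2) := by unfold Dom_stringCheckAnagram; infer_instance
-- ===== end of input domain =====

-- B replaces A's scan-and-mark loop with a one-line per-character count comparison (objective: simpler).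

-- ===== PORT A =====
-- inner while: scan alist for the first cell equal to `some c`; if found, mark it
-- None (here: `none`) and return the updated list, else report not-found (`none`).
def pvInnerScanA (c : Char) : List (Option Char) → Option (List (Option Char))
  | [] => none
  | x :: xs =>
    if x = some c then some (none :: xs)
    else (pvInnerScanA c xs).map (x :: ·)

-- outer while over the characters of s1 with the stillOk flag: a not-found sets
-- stillOk = False and the loop then exits; otherwise continue with the marked list.
def pvOuterLoopA (alist : List (Option Char)) : List Char → Bool
  | [] => true
  | c :: cs =>
    match pvInnerScanA c alist with
    | some alist' => pvOuterLoopA alist' cs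
    | none => false

def stringCheckAnagram (s1 : String) (s2 : String) : Bool :=
  pvOuterLoopA (s2.toList.map some) s1.toList

-- ===== PORT B =====
-- Source B: all(s1.count(c) <= s2.count(c) for c in s1); str.count with a single-char
-- needle is exactly the number of equal characters, ported as List.count.
def stringCheckAnagram_alt (s1 : String) (s2 : String) : Bool :=
  s1.toList.all (fun c => s1.toList.count c ≤ s2.toList.count c)

-- ===== PRECONDITION & SPEC =====
def Spec_stringCheckAnagram (s1 : String) (s2 : String) (out : Bool) : Prop := out = stringCheckAnagram_alt s1 s2
instance (s1 : String) (s2 : String) (out : Bool) : Decidable (Spec_stringCheckAnagram s1 s2 out) := by unfold Spec_stringCheckAnagram; infer_instance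

-- ===== CLAIM (what is proved, stated in full; the proofs are below) =====
def Claim_equal_stringCheckAnagram : Prop := ∀ (s1 : String) (s2 : String), Dom_stringCheckAnagram s1 s2 → Spec_stringCheckAnagram s1 s2 (stringCheckAnagram s1 s2)

-- ===== LEMMAS AND PROOFS =====

-- membership in the available (unmarked) cells
theorem pv_mem_filterMap_id (c : Char) (al : List (Option Char)) :
    c ∈ al.filterMap id ↔ some c ∈ al := by
  simp [List.mem_filterMap]

-- inner scan fails exactly when `some c` is absent
theorem pvInnerScanA_eq_none (c : Char) (al : List (Option Char)) :
    pvInnerScanA c al = none ↔ some c ∉ al := by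
  induction al with
  | nil => simp [pvInnerScanA]
  | cons x xs ih =>
    by_cases hx : x = some c
    · simp [pvInnerScanA, hx]
    · simp [pvInnerScanA, hx, Option.map_eq_none_iff, ih]
      tauto

-- marking one cell removes exactly one copy of c from the available multiset
theorem pvInnerScanA_some_multiset (c : Char) (al al' : List (Option Char))
    (h : pvInnerScanA c al = some al') :
    (al.filterMap id : Multiset Char) = c ::ₘ (al'.filterMap id : Multiset Char) := by
  induction al generalizing al' with
  | nil => simp [pvInnerScanA] at h
  | cons x xs ih =>
    by_cases hx : x = some c
    · simp [pvInnerScanA, hx] at h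
      subst h
      simp [hx, List.filterMap_cons]
    · simp [pvInnerScanA, hx, Option.map_eq_some_iff] at h
      obtain ⟨ys, hys, rfl⟩ := h
      have := ih ys hys
      cases x with
      | none => simpa [List.filterMap_cons] using this
      | some d =>
        have h1 : List.filterMap id (some d :: xs) = d :: List.filterMap id xs := by simp
        have h2 : List.filterMap id (some d :: ys) = d :: List.filterMap id ys := by simp
        rw [h1, h2, ← Multiset.cons_coe, ← Multiset.cons_coe, this, Multiset.cons_swap]

-- A's loop succeeds exactly when the pending characters fit in the available multiset
theorem pvOuterLoopA_iff (l : List Char) (al : List (Option Char)) :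
    pvOuterLoopA al l = true ↔ (l : Multiset Char) ≤ (al.filterMap id : Multiset Char) := by
  induction l generalizing al with
  | nil => simp [pvOuterLoopA]
  | cons c cs ih =>
    cases h : pvInnerScanA c al with
    | none =>
      have hmem : some c ∉ al := (pvInnerScanA_eq_none c al).mp h
      simp only [pvOuterLoopA, h]
      constructor
      · intro hfalse; cases hfalse
      · intro hle
        exact absurd ((pv_mem_filterMap_id c al).mp
          (by exact_mod_cast Multiset.mem_of_le hle (by simp))) hmem
    | some al' =>
      have hms := pvInnerScanA_some_multiset c al al' h
      simp only [pvOuterLoopA, h, ih, hms]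
      rw [← Multiset.cons_coe, Multiset.cons_le_cons_iff]

-- B's all-counts test is the same multiset inequality
theorem pv_alt_iff (l1 l2 : List Char) :
    (l1.all (fun c => l1.count c ≤ l2.count c) = true) ↔
      (l1 : Multiset Char) ≤ (l2 : Multiset Char) := by
  rw [Multiset.le_iff_count]
  simp only [List.all_eq_true, decide_eq_true_eq, Multiset.coe_count]
  constructor
  · intro h a
    by_cases ha : a ∈ l1
    · exact h a ha
    · simp [List.count_eq_zero_of_not_mem ha]
  · intro h c _
    exact h c

-- ===== VERDICT (by name: the statement is the Claim_ definition above) =====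
theorem stringCheckAnagram_spec : Claim_equal_stringCheckAnagram := by
  intro s1 s2 _
  unfold Spec_stringCheckAnagram stringCheckAnagram stringCheckAnagram_alt
  have hA := pvOuterLoopA_iff s1.toList (s2.toList.map some)
  have hB := pv_alt_iff s1.toList s2.toList
  have hfm : (s2.toList.map some).filterMap id = s2.toList := by
    simp [List.filterMap_map]
  rw [hfm] at hA
  rw [Bool.eq_iff_iff, hA, hB]
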